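/- GENERATED by tools/mkcompositions.py from design/units.gif.tsv (unit `DGifGetCodeNext.COMPOSITION`) — do not edit.
   THE PROOF of the composition unit `DGifGetCodeNext.COMPOSITION`: the 4 segments of `DGifGetCodeNext` chain into its contract, by the theorem
   `Gif.Spec.DGifGetCodeNext.compose` (proved next to the cut assertions). -/
import Gif.Spec.Units.DGifGetCodeNext_COMPOSITION

/-- The segments of `DGifGetCodeNext` compose into its contract. -/
theorem Gif.Spec.Proved.DGifGetCodeNext_COMPOSITION_ok : Gif.Spec.DGifGetCodeNext_COMPOSITION.Statement := by
  intro Lay _hLay μ _hμ u₀ h_DGifGetCodeNext_P h_DGifGetCodeNext_1 h_DGifGetCodeNext_2 h_DGifGetCodeNext_E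
  apply Gif.Spec.DGifGetCodeNext.compose
  all_goals assumption
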